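-- pv_equiv track=rewrite | github.com/ggam-nyang/Jungle_record | algorithm/네이버파이낸셜/1.py | solution
-- ===== SOURCE A (Python) =====
-- def solution(id_list, k):
--     answer = 0
--     coupon_count_dict = {}
--
--     for today_ids in id_list:
--         temp_check_list = []
--         today_id_list = today_ids.split(" ")
--         for id in today_id_list:
--             try:
--                 if coupon_count_dict[id] < k and id not in temp_check_list:
--                     coupon_count_dict[id] += 1
--             except:
--                 coupon_count_dict[id] = 1
--             temp_check_list.append(id)
--     for coupon in coupon_count_dict.values():
--         answer += coupon
--
--     return answer
-- ===== SOURCE B (Python) =====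
-- def solution(id_list, k):
--     appearances = sorted(uid for ids in id_list for uid in set(ids.split(" ")))
--     total = 0
--     run = 0
--     prev = None
--     for uid in appearances:
--         if uid != prev:
--             prev = uid
--             run = 1
--             total += 1
--         elif run < k:
--             run += 1
--             total += 1
--     return total
-- ===== Notes on version B (the rewrite author's own statement) =====
-- stated objective: alternative
-- what changed: B replaces A's day-major dict counting (try/except update guarded by a per-day temp list) with a sort-then-scan algorithm: flatten all per-day appearance events, sort them, and sum capped run lengths in one linear scan with no dictionary at all.
import Mathlib
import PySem

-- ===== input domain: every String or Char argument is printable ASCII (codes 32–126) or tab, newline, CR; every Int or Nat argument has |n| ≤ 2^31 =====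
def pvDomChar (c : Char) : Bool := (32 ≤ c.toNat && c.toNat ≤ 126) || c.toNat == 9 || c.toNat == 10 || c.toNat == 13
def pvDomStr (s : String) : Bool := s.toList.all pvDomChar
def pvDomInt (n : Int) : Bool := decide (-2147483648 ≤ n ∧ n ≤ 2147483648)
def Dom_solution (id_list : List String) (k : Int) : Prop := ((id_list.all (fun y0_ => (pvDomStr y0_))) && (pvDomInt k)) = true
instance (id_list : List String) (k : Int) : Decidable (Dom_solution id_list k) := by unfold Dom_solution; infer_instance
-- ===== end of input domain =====

-- B replaces A's day-major dict counting with sort-then-scan over all appearance events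
-- (a genuinely different algorithm of similar cost).

-- ===== PORT A =====
-- inner-loop body of A: state = (coupon_count_dict, temp_check_list)
def solAStep (k : Int) (st : PySem.Dict String Int × List String) (id : String) :
    PySem.Dict String Int × List String :=
  match st.1.get? id with
  | some v => (if v < k ∧ id ∉ st.2 then st.1.insert id (v + 1) else st.1, st.2 ++ [id])
  | none => (st.1.insert id 1, st.2 ++ [id])

-- one day of A's outer loop (temp_check_list starts empty each day)
def solADay (k : Int) (d : PySem.Dict String Int) (today_ids : String) : PySem.Dict String Int :=
  (((PySem.Str.split? today_ids " ").getD []).foldl (solAStep k) (d, [])).1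

def solution (id_list : List String) (k : Int) : Int :=
  (id_list.foldl (solADay k) (PySem.Dict.mk [])).values.foldl (fun answer coupon => answer + coupon) 0

-- ===== PORT B =====
-- B's loop body: state = (total, run, prev); 'uid != prev' with prev initially None → Option String
def solBStep (k : Int) (st : Int × Int × Option String) (uid : String) : Int × Int × Option String :=
  if some uid ≠ st.2.2 then (st.1 + 1, 1, some uid)
  else if st.2.1 < k then (st.1 + 1, st.2.1 + 1, st.2.2)
  else st

-- sorted(uid for ids in id_list for uid in set(ids.split(" "))): the multiset fed to sorted
-- is the per-day dedup'd ids (PySem.List.dedup; Python's set iteration order is erased by sorted,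
-- whose output depends only on the multiset, so the port is exact).
def solution_alt (id_list : List String) (k : Int) : Int :=
  let appearances := PySem.List.sorted
    (id_list.flatMap (fun ids => PySem.List.dedup ((PySem.Str.split? ids " ").getD [])))
    (fun x => x) false
  (appearances.foldl (solBStep k) (0, 0, none)).1

-- ===== PRECONDITION & SPEC =====
def Spec_solution (id_list : List String) (k : Int) (out : Int) : Prop := out = solution_alt id_list k
instance (id_list : List String) (k : Int) (out : Int) : Decidable (Spec_solution id_list k out) := by unfold Spec_solution; infer_instance

-- ===== CLAIM (what is proved, stated in full; the proofs are below) =====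
def Claim_equal_solution : Prop := ∀ (id_list : List String) (k : Int), Dom_solution id_list k → Spec_solution id_list k (solution id_list k)

-- ===== LEMMAS AND PROOFS =====

-- ---- proof-side counter machinery: A's capped dict is the value-capped Counter of the
-- ---- flattened per-day-dedup'd appearance list F ----

def dayIds (s : String) : List String := PySem.List.dedup ((PySem.Str.split? s " ").getD [])

def cntStep (f : PySem.Dict String Int) (uid : String) : PySem.Dict String Int :=
  f.insert uid (f.getD uid 0 + 1)

def cntDay (f : PySem.Dict String Int) (today_ids : String) : PySem.Dict String Int :=
  (dayIds today_ids).foldl cntStep f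

-- cap every value of a dict by `cap` (keeps keys and order)
def capV (cap : Int) (f : PySem.Dict String Int) : PySem.Dict String Int :=
  ⟨f.items.map (fun p => (p.1, min p.2 cap))⟩

-- counter fold rewritten as a one-pass fold carrying the seen-set (proof device)
def cntStepP (p : PySem.Dict String Int × List String) (x : String) :
    PySem.Dict String Int × List String :=
  if x ∈ p.2 then p else (cntStep p.1 x, PySem.Set.add p.2 x)

theorem get?_capV (cap : Int) (f : PySem.Dict String Int) (id : String) :
    (capV cap f).get? id = (f.get? id).map (fun v => min v cap) := by
  unfold capV PySem.Dict.get?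
  rw [List.find?_map]
  have hpe : ((fun p => p.1 == id) ∘ fun p : String × Int => (p.1, min p.2 cap))
      = (fun p => p.1 == id) := rfl
  rw [hpe]
  cases List.find? (fun p => p.1 == id) f.items <;> rfl

theorem contains_capV (cap : Int) (f : PySem.Dict String Int) (id : String) :
    (capV cap f).contains id = f.contains id := by
  unfold capV PySem.Dict.contains
  rw [List.any_map]
  rfl

theorem insert_capV (cap : Int) (f : PySem.Dict String Int) (id : String) (x : Int) :
    capV cap (f.insert id x) = (capV cap f).insert id (min x cap) := by
  unfold PySem.Dict.insert
  rw [contains_capV]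
  by_cases h : f.contains id
  · simp only [h, if_true]
    unfold capV
    simp only [PySem.Dict.mk.injEq, List.map_map]
    apply List.map_congr_left
    intro p _
    by_cases hp : p.1 = id <;> simp [hp]
  · rw [if_neg h, if_neg h]
    unfold capV
    simp

theorem values_capV (cap : Int) (f : PySem.Dict String Int) :
    (capV cap f).values = f.values.map (fun v => min v cap) := by
  unfold capV PySem.Dict.values
  simp

theorem mem_items_insert (f : PySem.Dict String Int) (id : String) (v : Int) (p : String × Int)
    (hp : p ∈ (f.insert id v).items) : p = (id, v) ∨ p ∈ f.items := by
  unfold PySem.Dict.insert at hp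
  by_cases h : f.contains id
  · simp only [h, if_true, List.mem_map] at hp
    obtain ⟨q, hq, hqe⟩ := hp
    by_cases hq1 : q.1 = id
    · left; rw [if_pos (by simp [hq1])] at hqe; exact hqe.symm
    · right; rw [if_neg (by simp [hq1])] at hqe; exact hqe ▸ hq
  · simp only [h, Bool.false_eq_true, if_false, List.mem_append, List.mem_singleton] at hp
    tauto

theorem not_mem_keys_of_not_contains (f : PySem.Dict String Int) (id : String)
    (h : f.contains id = false) : id ∉ f.items.map Prod.fst := by
  unfold PySem.Dict.contains at h
  simp only [List.any_eq_false] at h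
  intro hmem
  obtain ⟨p, hp, hpe⟩ := List.mem_map.mp hmem
  exact h p hp (by simp [hpe])

theorem keys_insert (f : PySem.Dict String Int) (id : String) (v : Int)
    (h : (f.items.map Prod.fst).Nodup) : ((f.insert id v).items.map Prod.fst).Nodup := by
  unfold PySem.Dict.insert
  by_cases hc : f.contains id
  · simp only [hc, if_true]
    have heq : (List.map (fun p => if (p.1 == id) = true then (id, v) else p) f.items).map Prod.fst
        = f.items.map Prod.fst := by
      simp only [List.map_map]
      apply List.map_congr_left
      intro p _
      by_cases hp : p.1 = id <;> simp [hp]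
    show ((List.map (fun p => if (p.1 == id) = true then (id, v) else p) f.items).map Prod.fst).Nodup
    rw [heq]; exact h
  · rw [if_neg hc]
    show ((f.items ++ [(id, v)]).map Prod.fst).Nodup
    rw [List.map_append, List.nodup_append]
    refine ⟨h, by simp, ?_⟩
    intro a ha b hb hab
    apply not_mem_keys_of_not_contains f id (by simpa using hc)
    have haid : a = id := hab.trans (by simpa using hb)
    rwa [haid] at ha

theorem get?_eq_none_of_not_contains (f : PySem.Dict String Int) (id : String)
    (h : f.contains id = false) : f.get? id = none := by
  unfold PySem.Dict.contains at h
  unfold PySem.Dict.get?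
  rw [List.find?_eq_none.mpr]
  · rfl
  · intro p hp
    simp only [List.any_eq_false] at h
    exact fun hb => (h p hp) hb

theorem get?_isSome_of_contains (f : PySem.Dict String Int) (id : String)
    (h : f.contains id = true) : ∃ v, f.get? id = some v := by
  unfold PySem.Dict.contains at h
  unfold PySem.Dict.get?
  rw [List.any_eq_true] at h
  have : (List.find? (fun p => p.1 == id) f.items).isSome := List.find?_isSome.mpr h
  obtain ⟨q, hq⟩ := Option.isSome_iff_exists.mp this
  exact ⟨q.2, by rw [hq]; rfl⟩

-- a pair whose key is found by get? is unique under Nodup keys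
theorem eq_of_mem_of_find? (id : String) (q : String × Int) :
    ∀ (l : List (String × Int)), (l.map Prod.fst).Nodup →
    List.find? (fun p => p.1 == id) l = some q →
    ∀ p ∈ l, p.1 = id → p = q := by
  intro l
  induction l with
  | nil => intro _ h; simp at h
  | cons a l ih =>
    intro hnd hf p hp hpid
    simp only [List.map_cons, List.nodup_cons] at hnd
    by_cases ha : a.1 = id
    · rw [List.find?_cons_of_pos (by simp [ha])] at hf
      injection hf with hq
      subst hq
      rcases List.mem_cons.mp hp with h | h
      · exact h
      · exfalso
        apply hnd.1
        have hmm : p.1 ∈ l.map Prod.fst := List.mem_map_of_mem h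
        rwa [hpid, ← ha] at hmm
    · rw [List.find?_cons_of_neg (by simp [ha])] at hf
      rcases List.mem_cons.mp hp with h | h
      · subst h
        exact (ha hpid).elim
      · exact ih hnd.2 hf p h hpid

theorem insert_eq_self_of_get? (f : PySem.Dict String Int) (id : String) (v : Int)
    (hnd : (f.items.map Prod.fst).Nodup) (h : f.get? id = some v) : f.insert id v = f := by
  have hc : f.contains id = true := by
    unfold PySem.Dict.get? at h
    unfold PySem.Dict.contains
    rw [List.any_eq_true]
    cases hf : List.find? (fun p => p.1 == id) f.items with
    | none => rw [hf] at h; simp at h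
    | some q => exact ⟨q, List.mem_of_find?_eq_some hf, by simpa using List.find?_some hf⟩
  obtain ⟨q, hqf, hq2⟩ : ∃ q, List.find? (fun p => p.1 == id) f.items = some q ∧ q.2 = v := by
    unfold PySem.Dict.get? at h
    cases hf : List.find? (fun p => p.1 == id) f.items with
    | none => rw [hf] at h; simp at h
    | some q => rw [hf] at h; exact ⟨q, rfl, by simpa using h⟩
  have hq1 : q.1 = id := by simpa using List.find?_some hqf
  unfold PySem.Dict.insert
  simp only [hc, if_true]
  congr 1
  conv_rhs => rw [← List.map_id f.items]
  apply List.map_congr_left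
  intro p hp
  by_cases hpid : p.1 = id
  · have hpq := eq_of_mem_of_find? id q f.items hnd hqf p hp hpid
    rw [if_pos (by simp [hpid]), hpq, ← hq1, ← hq2]
    rfl
  · rw [if_neg (by simp [hpid])]; rfl

-- folding over the deduplicated list = one pass carrying a seen-set
theorem dedup_foldl : ∀ (l : List String) (s : List String) (f : PySem.Dict String Int),
    List.foldl cntStep f (List.foldl PySem.Set.add s l) =
      (List.foldl cntStepP (List.foldl cntStep f s, s) l).1 := by
  intro l
  induction l with
  | nil => intro s f; rfl
  | cons a l ih =>
    intro s f
    by_cases ha : a ∈ s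
    · simp only [List.foldl_cons, PySem.Set.add_of_mem ha, cntStepP, if_pos ha]
      exact ih s f
    · have hadd : PySem.Set.add s a = s ++ [a] := PySem.Set.add_of_not_mem ha
      simp only [List.foldl_cons, cntStepP, if_neg ha, hadd]
      rw [ih (s ++ [a]) f, List.foldl_append]
      rfl

-- the main inner-loop invariant: one day of A tracks one day of the counter under value-capping
theorem inner (k cap : Int) (hcap : cap = max k 1) :
    ∀ (l : List String) (f : PySem.Dict String Int) (t s : List String),
    (∀ id, id ∈ t ↔ id ∈ s) →
    (∀ p ∈ f.items, 1 ≤ p.2) →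
    (∀ id ∈ t, f.contains id = true) →
    (f.items.map Prod.fst).Nodup →
    (l.foldl (solAStep k) (capV cap f, t)).1 = capV cap (l.foldl cntStepP (f, s)).1
    ∧ (∀ p ∈ (l.foldl cntStepP (f, s)).1.items, 1 ≤ p.2)
    ∧ ((l.foldl cntStepP (f, s)).1.items.map Prod.fst).Nodup := by
  have hcap1 : 1 ≤ cap := hcap ▸ le_max_right k 1
  have hcapk : k ≤ cap := hcap ▸ le_max_left k 1
  have hcapor : cap = k ∨ cap = 1 := hcap ▸ max_choice k 1
  intro l
  induction l with
  | nil => intro f t s _ h1 _ hnd; exact ⟨rfl, h1, hnd⟩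
  | cons id l ih =>
    intro f t s hm h1 ht hnd
    simp only [List.foldl_cons]
    by_cases hid : id ∈ t
    · -- duplicate within the day: both sides do nothing to the dict
      obtain ⟨w, hw⟩ := get?_isSome_of_contains f id (ht id hid)
      have hA : solAStep k (capV cap f, t) id = (capV cap f, t ++ [id]) := by
        simp [solAStep, get?_capV, hw, hid]
      have hB : cntStepP (f, s) id = (f, s) := by
        simp [cntStepP, (hm id).mp hid]
      rw [hA, hB]
      exact ih f (t ++ [id]) s
        (fun i => by
          simp only [List.mem_append, List.mem_singleton]
          constructor
          · rintro (h | rfl)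
            · exact (hm i).mp h
            · exact (hm _).mp hid
          · intro h
            exact Or.inl ((hm i).mpr h))
        h1
        (fun i hi => by
          rcases List.mem_append.mp hi with h | h
          · exact ht i h
          · simp only [List.mem_singleton] at h; exact h ▸ ht id hid)
        hnd
    · have hs : id ∉ s := fun h => hid ((hm id).mpr h)
      have hB : cntStepP (f, s) id = (f.insert id (f.getD id 0 + 1), s ++ [id]) := by
        simp only [cntStepP, cntStep, if_neg hs, PySem.Set.add_of_not_mem hs]
      by_cases hc : f.contains id
      · -- id already known from a previous day
        obtain ⟨w, hw⟩ := get?_isSome_of_contains f id hc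
        have hw1 : 1 ≤ w := by
          have hq := hw
          unfold PySem.Dict.get? at hq
          cases hf : List.find? (fun p => p.1 == id) f.items with
          | none => rw [hf] at hq; simp at hq
          | some q =>
            rw [hf] at hq
            simp only [Option.map_some, Option.some.injEq] at hq
            have hge := h1 q (List.mem_of_find?_eq_some hf)
            omega
        have hgD : f.getD id 0 = w := by simp [PySem.Dict.getD, hw]
        have hf' : capV cap (f.insert id (w + 1)) = (capV cap f).insert id (min (w + 1) cap) :=
          insert_capV cap f id (w + 1)
        have hA : (solAStep k (capV cap f, t) id).1 = capV cap (f.insert id (w + 1)) ∧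
            (solAStep k (capV cap f, t) id).2 = t ++ [id] := by
          have hgv : (capV cap f).get? id = some (min w cap) := by simp [get?_capV, hw]
          by_cases hv : min w cap < k
          · have : min (w + 1) cap = min w cap + 1 := by
              rcases hcapor with h | h <;> rcases min_cases w cap with ⟨e, _⟩ | ⟨e, _⟩ <;>
                rcases min_cases (w + 1) cap with ⟨e2, _⟩ | ⟨e2, _⟩ <;> omega
            constructor
            · simp [solAStep, hgv, hv, hid, hf', this]
            · simp [solAStep, hgv]
          · have hsame : min (w + 1) cap = min w cap := by
              rcases hcapor with h | h <;> rcases min_cases w cap with ⟨e, _⟩ | ⟨e, _⟩ <;>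
                rcases min_cases (w + 1) cap with ⟨e2, _⟩ | ⟨e2, _⟩ <;> omega
            have hself : (capV cap f).insert id (min w cap) = capV cap f := by
              apply insert_eq_self_of_get? _ _ _ ?_ hgv
              unfold capV
              have : (f.items.map (fun p => (p.1, min p.2 cap))).map Prod.fst
                  = f.items.map Prod.fst := by
                simp only [List.map_map]; rfl
              show ((f.items.map (fun p => (p.1, min p.2 cap))).map Prod.fst).Nodup
              rw [this]; exact hnd
            constructor
            · simp [solAStep, hgv, hv, hid, hf', hsame, hself]
            · simp [solAStep, hgv]
        rw [hB, hgD]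
        have hstep : solAStep k (capV cap f, t) id = (capV cap (f.insert id (w + 1)), t ++ [id]) :=
          Prod.ext hA.1 hA.2
        rw [hstep]
        exact ih (f.insert id (w + 1)) (t ++ [id]) (s ++ [id])
          (fun i => by
            simp only [List.mem_append, List.mem_singleton]
            exact or_congr (hm i) Iff.rfl)
          (fun p hp => by
            rcases mem_items_insert f id (w + 1) p hp with rfl | h
            · simp; omega
            · exact h1 p h)
          (fun i hi => by
            rw [PySem.Dict.contains_insert]
            rcases List.mem_append.mp hi with h | h
            · simp [ht i h]
            · simp only [List.mem_singleton] at h; simp [h])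
          (keys_insert f id (w + 1) hnd)
      · -- first-ever occurrence: both insert value 1
        have hn : f.get? id = none := get?_eq_none_of_not_contains f id (by simpa using hc)
        have hgD : f.getD id 0 = 0 := by simp [PySem.Dict.getD, hn]
        have hA : solAStep k (capV cap f, t) id = ((capV cap f).insert id 1, t ++ [id]) := by
          simp [solAStep, get?_capV, hn]
        have hcap1' : min (0 + 1 : Int) cap = 1 := by omega
        have hf' : capV cap (f.insert id (0 + 1)) = (capV cap f).insert id 1 := by
          rw [insert_capV, hcap1']
        rw [hB, hgD, hA, ← hf']
        exact ih (f.insert id (0 + 1)) (t ++ [id]) (s ++ [id])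
          (fun i => by
            simp only [List.mem_append, List.mem_singleton]
            exact or_congr (hm i) Iff.rfl)
          (fun p hp => by
            rcases mem_items_insert f id (0 + 1) p hp with rfl | h
            · simp
            · exact h1 p h)
          (fun i hi => by
            rw [PySem.Dict.contains_insert]
            rcases List.mem_append.mp hi with h | h
            · simp [ht i h]
            · simp only [List.mem_singleton] at h; simp [h])
          (keys_insert f id (0 + 1) hnd)

-- one day: A's day function tracks the counter's day function under value-capping
theorem day_eq (k cap : Int) (hcap : cap = max k 1) (f : PySem.Dict String Int)
    (day : String)
    (h1 : ∀ p ∈ f.items, 1 ≤ p.2) (hnd : (f.items.map Prod.fst).Nodup) :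
    solADay k (capV cap f) day = capV cap (cntDay f day)
    ∧ (∀ p ∈ (cntDay f day).items, 1 ≤ p.2)
    ∧ ((cntDay f day).items.map Prod.fst).Nodup := by
  unfold solADay cntDay dayIds
  rw [PySem.List.dedup_eq_ofList, PySem.Set.ofList_eq_foldl, dedup_foldl _ [] f]
  exact inner k cap hcap _ f [] [] (by simp) h1 (by simp) hnd

-- the outer loop over days
theorem outer (k cap : Int) (hcap : cap = max k 1) :
    ∀ (days : List String) (f : PySem.Dict String Int),
    (∀ p ∈ f.items, 1 ≤ p.2) → (f.items.map Prod.fst).Nodup →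
    days.foldl (solADay k) (capV cap f) = capV cap (days.foldl cntDay f) := by
  intro days
  induction days with
  | nil => intro f _ _; rfl
  | cons day days ih =>
    intro f h1 hnd
    simp only [List.foldl_cons]
    obtain ⟨heq, h1', hnd'⟩ := day_eq k cap hcap f day h1 hnd
    rw [heq]
    exact ih (cntDay f day) h1' hnd'

-- the days-fold of the counter is the Counter of the flattened appearance list
theorem foldl_cntDay_eq_flat : ∀ (days : List String) (f : PySem.Dict String Int),
    days.foldl cntDay f = (days.flatMap dayIds).foldl cntStep f := by
  intro days
  induction days with
  | nil => intro f; rfl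
  | cons d days ih =>
    intro f
    simp only [List.foldl_cons, List.flatMap_cons, List.foldl_append]
    exact ih _

-- A's result, characterised: the capped-count sum over the distinct appearance events
theorem A_char (id_list : List String) (k : Int) :
    solution id_list k
      = ((PySem.Set.ofList (id_list.flatMap dayIds)).map
          (fun u => min (((id_list.flatMap dayIds).count u : Nat) : Int) (max k 1))).sum := by
  unfold solution
  have h0 : (PySem.Dict.mk [] : PySem.Dict String Int) = capV (max k 1) (PySem.Dict.mk []) := rfl
  rw [h0, outer k (max k 1) rfl id_list (PySem.Dict.mk []) (by simp) (by simp)]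
  rw [foldl_cntDay_eq_flat, ← List.sum_eq_foldl, values_capV]
  have hcnt : (id_list.flatMap dayIds).foldl cntStep (PySem.Dict.mk [])
      = PySem.Dict.counter (id_list.flatMap dayIds) :=
    PySem.Dict.foldl_insert_getD_add_one_eq_counter (id_list.flatMap dayIds)
  rw [hcnt]
  rw [show (PySem.Dict.counter (id_list.flatMap dayIds)).values
      = ((PySem.Dict.counter (id_list.flatMap dayIds)).items.map (·.2)) from rfl]
  rw [PySem.Dict.items_counter]
  simp only [List.map_map]
  rfl

-- ---- B-side: the sorted scan sums capped run lengths ----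

-- a run of equal ids starting with run value r
theorem chunk_scan (k : Int) : ∀ (c : List String) (u : String) (t r : Int),
    (∀ x ∈ c, x = u) →
    c.foldl (solBStep k) (t, r, some u)
      = (t + (max r (min (r + (c.length : Int)) k) - r), max r (min (r + (c.length : Int)) k),
          some u) := by
  intro c
  induction c with
  | nil =>
    intro u t r _
    simp only [List.foldl_nil, List.length_nil, Nat.cast_zero]
    have : max r (min (r + (0:Int)) k) = r := by omega
    rw [this]; simp
  | cons x c ih =>
    intro u t r hc
    have hx : x = u := hc x List.mem_cons_self
    subst hx
    have hstep : solBStep k (t, r, some x) x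
        = if r < k then (t + 1, r + 1, some x) else (t, r, some x) := by
      simp [solBStep]
    rw [List.foldl_cons, hstep]
    by_cases hr : r < k
    · rw [if_pos hr, ih x (t+1) (r+1) (fun y hy => hc y (List.mem_cons_of_mem _ hy))]
      have h1 : max (r+1) (min (r + 1 + (c.length : Int)) k) = max r (min (r + ((c.length : Int) + 1)) k) := by omega
      have h2 : t + 1 + (max (r+1) (min (r + 1 + (c.length : Int)) k) - (r+1))
          = t + (max r (min (r + ((c.length : Int) + 1)) k) - r) := by omega
      simp only [List.length_cons]
      push_cast
      rw [h2, h1]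
    · rw [if_neg hr, ih x t r (fun y hy => hc y (List.mem_cons_of_mem _ hy))]
      have h1 : max r (min (r + (c.length : Int)) k) = max r (min (r + ((c.length : Int) + 1)) k) := by omega
      simp only [List.length_cons]
      push_cast
      rw [← h1]

-- pushing a fresh element through a Set.add fold keeps it in front
theorem foldl_add_cons_fresh : ∀ (xs s : List String) (a : String),
    (∀ x ∈ xs, x ≠ a) →
    xs.foldl PySem.Set.add (a :: s) = a :: xs.foldl PySem.Set.add s := by
  intro xs
  induction xs with
  | nil => intro s a _; rfl
  | cons x xs ih =>
    intro s a h
    have hxa : x ≠ a := h x List.mem_cons_self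
    have hadd : PySem.Set.add (a :: s) x = a :: PySem.Set.add s x := by
      by_cases hx : x ∈ s
      · rw [PySem.Set.add_of_mem hx, PySem.Set.add_of_mem (by simp [hx])]
      · rw [PySem.Set.add_of_not_mem hx,
            PySem.Set.add_of_not_mem (by simp [hx, fun h' => hxa h'])]
        rfl
    rw [List.foldl_cons, List.foldl_cons, hadd]
    exact ih _ a (fun y hy => h y (List.mem_cons_of_mem _ hy))

-- a fold of Set.add over elements already present is the identity
theorem foldl_add_mem : ∀ (c s : List String), (∀ x ∈ c, x ∈ s) →
    c.foldl PySem.Set.add s = s := by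
  intro c
  induction c with
  | nil => intro s _; rfl
  | cons x c ih =>
    intro s h
    rw [List.foldl_cons, PySem.Set.add_of_mem (h x List.mem_cons_self)]
    exact ih s (fun y hy => h y (List.mem_cons_of_mem _ hy))

-- Set.ofList of a leading chunk: a, copies of a, then a-free tail
theorem ofList_chunk (a : String) (c r' : List String)
    (hc : ∀ x ∈ c, x = a) (hr : ∀ x ∈ r', x ≠ a) :
    PySem.Set.ofList (a :: (c ++ r')) = a :: PySem.Set.ofList r' := by
  rw [PySem.Set.ofList_eq_foldl, PySem.Set.ofList_eq_foldl]
  have h1 : (a :: (c ++ r')).foldl PySem.Set.add [] = (c ++ r').foldl PySem.Set.add [a] := rfl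
  rw [h1, List.foldl_append]
  rw [foldl_add_mem c [a] (fun x hx => by simp [hc x hx])]
  exact foldl_add_cons_fresh r' [] a hr

-- the whole scan over a sorted list
theorem scan_sorted (k : Int) : ∀ (n : Nat) (l : List String), l.length ≤ n →
    l.Pairwise (· ≤ ·) →
    ∀ (t r : Int) (prev : Option String), (∀ u, prev = some u → ∀ x ∈ l, u < x) →
    (l.foldl (solBStep k) (t, r, prev)).1
      = t + ((PySem.Set.ofList l).map (fun u => min ((l.count u : Nat) : Int) (max k 1))).sum := by
  intro n
  induction n with
  | zero =>
    intro l hl _ t r prev _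
    have : l = [] := List.eq_nil_of_length_eq_zero (Nat.le_zero.mp hl)
    subst this; simp
  | succ m ih =>
    intro l hl hp t r prev hprev
    match l with
    | [] => simp
    | a :: rest =>
      obtain ⟨hrest_le, hp_rest⟩ := List.pairwise_cons.mp hp
      generalize hc_def : rest.takeWhile (fun x => x == a) = c
      generalize hr_def : rest.dropWhile (fun x => x == a) = r'
      have hsplit : c ++ r' = rest := by
        rw [← hc_def, ← hr_def]; exact List.takeWhile_append_dropWhile
      have hc : ∀ x ∈ c, x = a := by
        intro x hx
        rw [← hc_def] at hx
        simpa using List.mem_takeWhile_imp hx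
      have hr' : ∀ x ∈ r', a < x := by
        cases hrr : r' with
        | nil => intro x hx; simp at hx
        | cons b tail =>
          have hhead := List.head?_dropWhile_not (fun x => x == a) rest
          rw [hr_def, hrr] at hhead
          have hb_ne : (b == a) = false := by simpa using hhead
          have hb_mem : b ∈ rest := by rw [← hsplit, hrr]; simp
          have hab : a < b := lt_of_le_of_ne (hrest_le b hb_mem)
            (fun h => by simp [← h] at hb_ne)
          have hsub : r'.Sublist rest := by
            rw [← hr_def]; exact List.dropWhile_sublist _
          have hp_r' : (b :: tail).Pairwise (· ≤ ·) := by
            rw [← hrr]; exact hp_rest.sublist hsub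
          intro x hx
          rcases List.mem_cons.mp hx with rfl | hx
          · exact hab
          · exact lt_of_lt_of_le hab ((List.pairwise_cons.mp hp_r').1 x hx)
      have hr'ne : ∀ x ∈ r', x ≠ a := fun x hx => ne_of_gt (hr' x hx)
      -- first step: new run
      have hfirst : solBStep k (t, r, prev) a = (t + 1, 1, some a) := by
        have hne : some a ≠ prev := by
          match prev with
          | none => simp
          | some u =>
            have := hprev u rfl a List.mem_cons_self
            simp only [ne_eq, Option.some.injEq]
            exact fun h => absurd h.symm (ne_of_lt this)
        simp [solBStep, hne]
      have hfold : (a :: rest).foldl (solBStep k) (t, r, prev)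
          = r'.foldl (solBStep k) (c.foldl (solBStep k) (t + 1, 1, some a)) := by
        rw [List.foldl_cons, hfirst, ← hsplit, List.foldl_append]
      set R : Int := max 1 (min (1 + (c.length : Int)) k) with hR_def
      have hchunk : c.foldl (solBStep k) (t + 1, 1, some a) = (t + R, R, some a) := by
        rw [chunk_scan k c a (t+1) 1 hc]
        have h1 : t + 1 + (max 1 (min (1 + (c.length : Int)) k) - 1) = t + R := by
          rw [hR_def]; omega
        rw [h1, hR_def]
      have hr'_len : r'.length ≤ m := by
        have h1 : r'.length ≤ rest.length := by
          rw [← hr_def]; exact (List.dropWhile_sublist _).length_le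
        have h2 : rest.length ≤ m := by
          simpa using Nat.le_of_succ_le_succ (by simpa using hl)
        omega
      have hp_r' : r'.Pairwise (· ≤ ·) := by
        rw [← hr_def]; exact hp_rest.sublist (List.dropWhile_sublist _)
      have htail := ih r' hr'_len hp_r' (t + R) R (some a)
        (fun u hu x hx => by injection hu with hu; subst hu; exact hr' x hx)
      rw [hfold, hchunk, htail]
      -- now the sums
      have hset : PySem.Set.ofList (a :: rest) = a :: PySem.Set.ofList r' := by
        rw [← hsplit]; exact ofList_chunk a c r' hc hr'ne
      have hcount_a : (a :: rest).count a = 1 + c.length := by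
        rw [← hsplit, List.count_cons_self]
        rw [List.count_append]
        have hca : c.count a = c.length := List.count_eq_length.mpr (fun x hx => by
          simpa using (hc x hx).symm ▸ rfl)
        have hra : r'.count a = 0 := List.count_eq_zero.mpr (fun hx => (hr'ne a hx) rfl)
        omega
      have hcount_u : ∀ u ∈ PySem.Set.ofList r', (a :: rest).count u = r'.count u := by
        intro u hu
        have humem : u ∈ r' := (PySem.Set.mem_ofList r' u).mp hu
        have hua : u ≠ a := hr'ne u humem
        rw [← hsplit, List.count_cons_of_ne (by exact fun h => hua h.symm) , List.count_append]
        have hcu : c.count u = 0 := List.count_eq_zero.mpr (fun hx => hua (hc u hx))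
        omega
      rw [hset]
      rw [List.map_cons, List.sum_cons]
      have hRa : min (((a :: rest).count a : Nat) : Int) (max k 1) = R := by
        rw [hcount_a, hR_def]; push_cast; omega
      rw [hRa]
      have hmap : (PySem.Set.ofList r').map
            (fun u => min (((a :: rest).count u : Nat) : Int) (max k 1))
          = (PySem.Set.ofList r').map
            (fun u => min ((r'.count u : Nat) : Int) (max k 1)) := by
        apply List.map_congr_left
        intro u hu
        rw [hcount_u u hu]
      rw [hmap]
      ring

-- two Nodup lists with the same members are permutations; used to align the two sums
theorem sum_ofList_perm (l₁ l₂ : List String) (h : l₁.Perm l₂) (g : String → Int) :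
    ((PySem.Set.ofList l₁).map g).sum = ((PySem.Set.ofList l₂).map g).sum := by
  have hperm : (PySem.Set.ofList l₁).Perm (PySem.Set.ofList l₂) := by
    apply List.perm_of_nodup_nodup_toFinset_eq
    · rw [← PySem.List.dedup_eq_ofList]; exact PySem.List.nodup_dedup l₁
    · rw [← PySem.List.dedup_eq_ofList]; exact PySem.List.nodup_dedup l₂
    · ext x
      simp only [List.mem_toFinset, PySem.Set.mem_ofList]
      exact h.mem_iff
  exact (hperm.map g).sum_eq

-- ===== VERDICT (by name: the statement is the Claim_ definition above) =====
theorem solution_spec : Claim_equal_solution := by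
  intro id_list k _
  unfold Spec_solution solution_alt
  set F := id_list.flatMap (fun ids => PySem.List.dedup ((PySem.Str.split? ids " ").getD [])) with hF
  have hFd : F = id_list.flatMap dayIds := rfl
  set sF := PySem.List.sorted F (fun x => x) false with hsF
  have hperm : sF.Perm F := PySem.List.sorted_perm F (fun x => x) false
  have hpw : sF.Pairwise (· ≤ ·) := by
    have := PySem.List.sorted_pairwise F (fun x => x)
    simpa using this
  have hscan := scan_sorted k sF.length sF (le_refl _) hpw 0 0 none (by intro u hu; cases hu)
  rw [hscan]
  have hcnt : ∀ u, sF.count u = F.count u := fun u => hperm.count_eq u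
  have hmap : (PySem.Set.ofList sF).map (fun u => min ((sF.count u : Nat) : Int) (max k 1))
      = (PySem.Set.ofList sF).map (fun u => min ((F.count u : Nat) : Int) (max k 1)) := by
    apply List.map_congr_left
    intro u _
    rw [hcnt u]
  rw [hmap, sum_ofList_perm sF F hperm _, A_char id_list k, ← hFd]
  ring
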